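-- pv_equiv track=rewrite | github.com/danisebastian9/Ciclo1 | Semana6/exerlist.py | crearListas
-- ===== SOURCE A (Python) =====
-- def crearListas(k, numeros):
--     menores = []
--     mayores = []
--     iguales = []
--     multiplos = []
--     for i in numeros:
--         if i < k:
--             menores.append(i)
--         elif i > k:
--             mayores.append(i)
--         else:
--             iguales.append(i)
--
--         if i % k == 0:
--             multiplos.append(i)
--     return menores, mayores, iguales, multiplos
-- ===== SOURCE B (Python) =====
-- def crearListas(k, numeros):
--     menores = [i for i in numeros if i < k]
--     mayores = [i for i in numeros if i > k]
--     iguales = [i for i in numeros if i == k]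
--     multiplos = [i for i in numeros if i % k == 0]
--     return menores, mayores, iguales, multiplos
-- ===== Notes on version B (the rewrite author's own statement) =====
-- stated objective: idiomatic
-- what changed: The single fused loop maintaining four accumulators is replaced by four independent list comprehensions, each filtering numeros by its own predicate (i<k, i>k, i==k, i%k==0).
import Mathlib
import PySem

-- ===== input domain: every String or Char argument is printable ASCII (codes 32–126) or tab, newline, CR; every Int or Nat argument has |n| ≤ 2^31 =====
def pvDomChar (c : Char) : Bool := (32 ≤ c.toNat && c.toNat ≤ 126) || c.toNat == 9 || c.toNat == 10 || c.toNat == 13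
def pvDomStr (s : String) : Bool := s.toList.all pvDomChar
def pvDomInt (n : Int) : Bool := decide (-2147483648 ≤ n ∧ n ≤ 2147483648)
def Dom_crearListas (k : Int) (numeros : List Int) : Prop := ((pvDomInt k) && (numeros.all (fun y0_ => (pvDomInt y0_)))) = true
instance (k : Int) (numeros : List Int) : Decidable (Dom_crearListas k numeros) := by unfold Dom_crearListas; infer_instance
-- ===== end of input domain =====

-- B replaces A's single fused loop with four independent filter passes (idiomatic, same O(n) cost).


-- ===== PORT A =====
-- fused loop: one fold over numeros carrying the four accumulators, appending to the back
def crearListasStep (k : Int) (s : List Int × List Int × List Int × List Int) (i : Int) :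
    List Int × List Int × List Int × List Int :=
  let s1 :=
    if i < k then (s.1 ++ [i], s.2.1, s.2.2.1, s.2.2.2)
    else if i > k then (s.1, s.2.1 ++ [i], s.2.2.1, s.2.2.2)
    else (s.1, s.2.1, s.2.2.1 ++ [i], s.2.2.2)
  if PySem.Int.mod i k == 0 then (s1.1, s1.2.1, s1.2.2.1, s1.2.2.2 ++ [i]) else s1

def crearListas (k : Int) (numeros : List Int) : List Int × List Int × List Int × List Int :=
  numeros.foldl (crearListasStep k) ([], [], [], [])

-- ===== PORT B =====
-- four independent comprehension passes
def crearListas_alt (k : Int) (numeros : List Int) : List Int × List Int × List Int × List Int :=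
  (numeros.filter (fun i => decide (i < k)),
   numeros.filter (fun i => decide (i > k)),
   numeros.filter (fun i => i == k),
   numeros.filter (fun i => PySem.Int.mod i k == 0))

-- ===== PRECONDITION & SPEC =====
-- Pre_ excludes k = 0 with nonempty numeros: there Python's 'i % 0' raises ZeroDivisionError (in both A and B).
def Pre_crearListas (k : Int) (numeros : List Int) : Prop := k ≠ 0 ∨ numeros = []
instance (k : Int) (numeros : List Int) : Decidable (Pre_crearListas k numeros) := by unfold Pre_crearListas; infer_instance
def pvWitness_crearListas : Int × List Int := (3, [1, 2, 3, 4, 5, 6, 0, -3])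

def Spec_crearListas (k : Int) (numeros : List Int) (out : List Int × List Int × List Int × List Int) : Prop := out = crearListas_alt k numeros
instance (k : Int) (numeros : List Int) (out : List Int × List Int × List Int × List Int) : Decidable (Spec_crearListas k numeros out) := by unfold Spec_crearListas; infer_instance

-- ===== CLAIM (what is proved, stated in full; the proofs are below) =====
def Claim_equal_crearListas : Prop := ∀ (k : Int) (numeros : List Int), Dom_crearListas k numeros → Pre_crearListas k numeros → Spec_crearListas k numeros (crearListas k numeros)

-- ===== LEMMAS AND PROOFS =====
-- loop invariant: folding from any accumulators appends the four filters of the remaining list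
theorem crearListas_foldl_eq (k : Int) (numeros : List Int)
    (m ma ig mu : List Int) :
    numeros.foldl (crearListasStep k) (m, ma, ig, mu) =
      (m ++ numeros.filter (fun i => decide (i < k)),
       ma ++ numeros.filter (fun i => decide (i > k)),
       ig ++ numeros.filter (fun i => i == k),
       mu ++ numeros.filter (fun i => PySem.Int.mod i k == 0)) := by
  induction numeros generalizing m ma ig mu with
  | nil => simp
  | cons i t ih =>
    simp only [List.foldl_cons, List.filter_cons]
    by_cases h1 : i < k
    · have h2 : ¬ (i == k) = true := by simp; omega
      have h3 : ¬ i > k := by omega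
      by_cases hm : (PySem.Int.mod i k == 0) = true
      · rw [show crearListasStep k (m, ma, ig, mu) i = (m ++ [i], ma, ig, mu ++ [i]) from by
          simp [crearListasStep, h1, hm], ih]
        simp [h1, h2, h3, hm, List.append_assoc]
      · rw [show crearListasStep k (m, ma, ig, mu) i = (m ++ [i], ma, ig, mu) from by
          simp [crearListasStep, h1, hm], ih]
        simp [h1, h2, h3, hm, List.append_assoc]
    · by_cases h3 : i > k
      · have h2 : ¬ (i == k) = true := by simp; omega
        by_cases hm : (PySem.Int.mod i k == 0) = true
        · rw [show crearListasStep k (m, ma, ig, mu) i = (m, ma ++ [i], ig, mu ++ [i]) from by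
            simp [crearListasStep, h1, h3, hm], ih]
          simp [h1, h2, h3, hm, List.append_assoc]
        · rw [show crearListasStep k (m, ma, ig, mu) i = (m, ma ++ [i], ig, mu) from by
            simp [crearListasStep, h1, h3, hm], ih]
          simp [h1, h2, h3, hm, List.append_assoc]
      · have h2 : (i == k) = true := by simp; omega
        by_cases hm : (PySem.Int.mod i k == 0) = true
        · rw [show crearListasStep k (m, ma, ig, mu) i = (m, ma, ig ++ [i], mu ++ [i]) from by
            simp [crearListasStep, h1, h3, hm], ih]
          simp [h1, h2, h3, hm, List.append_assoc]
        · rw [show crearListasStep k (m, ma, ig, mu) i = (m, ma, ig ++ [i], mu) from by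
            simp [crearListasStep, h1, h3, hm], ih]
          simp [h1, h2, h3, hm, List.append_assoc]

-- ===== VERDICT (by name: the statement is the Claim_ definition above) =====
theorem crearListas_spec : Claim_equal_crearListas := by
  intro k numeros _ _
  unfold Spec_crearListas crearListas crearListas_alt
  rw [crearListas_foldl_eq]
  simp
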